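-- pv_equiv track=rewrite | github.com/Tsarcastic/2018_code_wars | 6kyu_how_much.py | howmuch
-- ===== SOURCE A (Python) =====
-- def howmuch(m, n):
--     """."""
--     possible_answers = []
--
--     for number in range(m, n):
--         if number % 7 == 2 and number % 9 == 1:
--             this_answer = []
--             this_answer.append("M: {}".format(number))
--             this_answer.append("B: {}".format(int(number / 7)))
--             this_answer.append("C: {}".format(int(number / 9)))
--             possible_answers.append(this_answer)
--
--     return possible_answers
-- ===== SOURCE B (Python) =====
-- def _tdiv(a, b):
--     """Truncating division (matches int(a / b) for the magnitudes in play)."""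
--     return a // b if a >= 0 else -((-a) // b)
--
--
-- def howmuch(m, n):
--     # numbers with number % 7 == 2 and number % 9 == 1 are exactly
--     # the numbers congruent to 37 mod 63 (CRT); step by 63.
--     first = m + (37 - m) % 63
--     out = []
--     for number in range(first, n, 63):
--         out.append(["M: {}".format(number),
--                     "B: {}".format(_tdiv(number, 7)),
--                     "C: {}".format(_tdiv(number, 9))])
--     return out
-- ===== Notes on version B (the rewrite author's own statement) =====
-- stated objective: faster
-- what changed: Instead of testing every number in range(m, n) against both modular conditions, B solves the pair of congruences by CRT (number ≡ 37 mod 63), jumps to the first such number and steps by 63, emitting every visited number; float-based int(number/7) becomes exact truncating integer division.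
import Mathlib
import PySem

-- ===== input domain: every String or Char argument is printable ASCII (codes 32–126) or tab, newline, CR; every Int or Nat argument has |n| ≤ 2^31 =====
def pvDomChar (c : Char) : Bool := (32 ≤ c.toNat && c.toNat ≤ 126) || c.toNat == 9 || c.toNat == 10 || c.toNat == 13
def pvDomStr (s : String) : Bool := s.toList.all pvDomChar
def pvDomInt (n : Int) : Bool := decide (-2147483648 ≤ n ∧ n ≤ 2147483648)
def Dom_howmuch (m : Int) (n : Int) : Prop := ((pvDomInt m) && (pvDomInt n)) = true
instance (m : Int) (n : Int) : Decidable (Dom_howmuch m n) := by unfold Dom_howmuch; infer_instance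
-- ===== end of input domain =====

-- B replaces A's scan of every number in range(m, n) by a CRT stride: the matching
-- numbers are exactly those ≡ 37 (mod 63), so B steps by 63 from the first one (objective: faster).

-- ===== PORT A =====
-- int(number / 7): Python truncates the float quotient toward zero; on the stated
-- domain (|number| ≤ 2^31, number never a multiple of 7 or 9 at this call site) the
-- float is close enough that this is exact truncating division, Int.tdiv.
def howmuch (m : Int) (n : Int) : List (List String) :=
  (PySem.List.pyRange m n 1).foldl
    (fun possible_answers number =>
      if PySem.Int.mod number 7 == 2 && PySem.Int.mod number 9 == 1 then
        possible_answers ++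
          [["M: " ++ PySem.Int.toStr number,
            "B: " ++ PySem.Int.toStr (Int.tdiv number 7),
            "C: " ++ PySem.Int.toStr (Int.tdiv number 9)]]
      else possible_answers) []

-- ===== PORT B =====
-- _tdiv(a, b) = a // b if a >= 0 else -((-a) // b)   (truncating division, b > 0)
def pvTdiv (a : Int) (b : Int) : Int :=
  if 0 ≤ a then PySem.Int.floordiv a b else -(PySem.Int.floordiv (-a) b)

def howmuch_alt (m : Int) (n : Int) : List (List String) :=
  let first := m + PySem.Int.mod (37 - m) 63
  (PySem.List.pyRange first n 63).foldl
    (fun out number =>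
      out ++
        [["M: " ++ PySem.Int.toStr number,
          "B: " ++ PySem.Int.toStr (pvTdiv number 7),
          "C: " ++ PySem.Int.toStr (pvTdiv number 9)]]) []

-- ===== PRECONDITION & SPEC =====
def Spec_howmuch (m : Int) (n : Int) (out : List (List String)) : Prop := out = howmuch_alt m n
instance (m : Int) (n : Int) (out : List (List String)) : Decidable (Spec_howmuch m n out) := by unfold Spec_howmuch; infer_instance

-- ===== CLAIM (what is proved, stated in full; the proofs are below) =====
def Claim_equal_howmuch : Prop := ∀ (m : Int) (n : Int), Dom_howmuch m n → Spec_howmuch m n (howmuch m n)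

-- ===== LEMMAS AND PROOFS =====

theorem pyRange63_nil (a b : Int) (h : b ≤ a) : PySem.List.pyRange a b 63 = [] := by
  rw [PySem.List.pyRange_of_pos a b (by norm_num), if_neg (by omega)]
  simp

theorem pyRange63_cons (a b : Int) (h : a < b) :
    PySem.List.pyRange a b 63 = a :: PySem.List.pyRange (a + 63) b 63 := by
  rw [PySem.List.pyRange_of_pos a b (by norm_num),
      PySem.List.pyRange_of_pos (a + 63) b (by norm_num), if_pos h]
  by_cases h2 : a + 63 < b
  · rw [if_pos h2]
    have hc : ((b - a + 63 - 1) / 63).toNat = ((b - (a + 63) + 63 - 1) / 63).toNat + 1 := by omega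
    rw [hc, List.range_succ_eq_map, List.map_cons, List.map_map]
    refine congrArg₂ _ (by norm_num) (List.map_congr_left ?_)
    intro k _
    simp [Function.comp, Nat.succ_eq_add_one]
    ring
  · rw [if_neg h2]
    have hc : ((b - a + 63 - 1) / 63).toNat = 1 := by omega
    rw [hc]
    simp

theorem filter_range_eq_stride : ∀ (len : Nat) (m n : Int), (n - m).toNat = len →
    (PySem.List.pyRange m n 1).filter (fun x => x % 63 == 37) =
      PySem.List.pyRange (m + (37 - m) % 63) n 63 := by
  intro len
  induction len with
  | zero =>
    intro m n hlen
    have hnm : n ≤ m := by omega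
    rw [PySem.List.pyRange_one_eq_nil hnm, pyRange63_nil _ _ (by omega)]
    simp
  | succ k ih =>
    intro m n hlen
    have hmn : m < n := by omega
    rw [PySem.List.pyRange_one_cons hmn, List.filter_cons,
        ih (m + 1) n (by omega)]
    by_cases h : m % 63 = 37
    · rw [if_pos (by simpa using h)]
      have h1 : m + 1 + (37 - (m + 1)) % 63 = m + 63 := by omega
      have h2 : m + (37 - m) % 63 = m := by omega
      rw [h1, h2, pyRange63_cons m n hmn]
    · rw [if_neg (by simpa using h)]
      have h1 : m + 1 + (37 - (m + 1)) % 63 = m + (37 - m) % 63 := by omega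
      rw [h1]

theorem cond_eq_mod63 (x : Int) :
    (PySem.Int.mod x 7 == 2 && PySem.Int.mod x 9 == 1) = (x % 63 == 37) := by
  rw [PySem.Int.mod_eq_emod_of_pos (by norm_num : (0:Int) < 7),
      PySem.Int.mod_eq_emod_of_pos (by norm_num : (0:Int) < 9)]
  rw [Bool.eq_iff_iff]
  simp only [Bool.and_eq_true, beq_iff_eq]
  omega

theorem pvTdiv_eq_tdiv (a b : Int) (hb : 0 < b) : pvTdiv a b = Int.tdiv a b := by
  unfold pvTdiv
  rw [PySem.Int.floordiv_eq_ediv_of_pos hb, PySem.Int.floordiv_eq_ediv_of_pos hb]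
  by_cases ha : 0 ≤ a
  · rw [if_pos ha, Int.tdiv_eq_ediv_of_nonneg ha]
  · rw [if_neg ha, ← Int.tdiv_eq_ediv_of_nonneg (by omega : (0:Int) ≤ -a), Int.neg_tdiv, neg_neg]

theorem howmuch_spec : Claim_equal_howmuch := by
  intro m n _
  unfold Spec_howmuch howmuch howmuch_alt
  rw [PySem.List.foldl_append_if
        (fun number => PySem.Int.mod number 7 == 2 && PySem.Int.mod number 9 == 1)
        (fun number =>
          ["M: " ++ PySem.Int.toStr number,
           "B: " ++ PySem.Int.toStr (Int.tdiv number 7),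
           "C: " ++ PySem.Int.toStr (Int.tdiv number 9)]),
      PySem.List.foldl_append_singleton_eq_map
        (fun number =>
          ["M: " ++ PySem.Int.toStr number,
           "B: " ++ PySem.Int.toStr (pvTdiv number 7),
           "C: " ++ PySem.Int.toStr (pvTdiv number 9)])]
  simp only [List.nil_append]
  have hfilter : (PySem.List.pyRange m n 1).filter
      (fun number => PySem.Int.mod number 7 == 2 && PySem.Int.mod number 9 == 1) =
      PySem.List.pyRange (m + PySem.Int.mod (37 - m) 63) n 63 := by
    rw [List.filter_congr (fun x _ => cond_eq_mod63 x),
        filter_range_eq_stride (n - m).toNat m n rfl,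
        PySem.Int.mod_eq_emod_of_pos (by norm_num : (0:Int) < 63)]
  rw [hfilter]
  exact List.map_congr_left fun x _ => by
    rw [pvTdiv_eq_tdiv x 7 (by norm_num), pvTdiv_eq_tdiv x 9 (by norm_num)]
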